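-- pv_equiv track=rewrite | github.com/elastic/curator | curator/curator.py | get_date_regex
-- ===== SOURCE A (Python) =====
-- DATE_REGEX = {
--     'Y' : '4',
--     'm' : '2',
--     'W' : '2',
--     'U' : '2',
--     'd' : '2',
--     'H' : '2',
-- }
--
-- def get_date_regex(timestring):
--     """
--     Return a regex string based on a provided strftime timestring.
--
--     :arg timestring: An strftime pattern
--     :rtype: Regex as string
--     """
--     prev = ''; curr = ''; regex = ''
--     for s in range(0, len(timestring)):
--         curr = timestring[s]
--         if curr == '%':
--             pass
--         elif curr in DATE_REGEX and prev == '%':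
--             regex += '\d{' + DATE_REGEX[curr] + '}'
--         else:
--             regex += "\\" + curr
--         prev = curr
--     return regex
-- ===== SOURCE B (Python) =====
-- DATE_REGEX = {
--     'Y' : '4',
--     'm' : '2',
--     'W' : '2',
--     'U' : '2',
--     'd' : '2',
--     'H' : '2',
-- }
--
-- def get_date_regex(timestring):
--     """Lookahead scanner: consumes percent escapes as whole two-character tokens."""
--     parts = []
--     i = 0
--     n = len(timestring)
--     while i < n:
--         c = timestring[i]
--         if c == '%':
--             if i + 1 < n and timestring[i + 1] in DATE_REGEX:
--                 parts.append('\d{' + DATE_REGEX[timestring[i + 1]] + '}')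
--                 i += 2
--             else:
--                 i += 1
--         else:
--             parts.append('\\' + c)
--             i += 1
--     return ''.join(parts)
-- ===== Notes on version B (the rewrite author's own statement) =====
-- stated objective: idiomatic
-- what changed: Replaces A's prev-character flag threaded through a char-by-char loop with a lookahead index scanner that consumes each percent escape as one whole two-character token and joins collected parts.
import Mathlib
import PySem

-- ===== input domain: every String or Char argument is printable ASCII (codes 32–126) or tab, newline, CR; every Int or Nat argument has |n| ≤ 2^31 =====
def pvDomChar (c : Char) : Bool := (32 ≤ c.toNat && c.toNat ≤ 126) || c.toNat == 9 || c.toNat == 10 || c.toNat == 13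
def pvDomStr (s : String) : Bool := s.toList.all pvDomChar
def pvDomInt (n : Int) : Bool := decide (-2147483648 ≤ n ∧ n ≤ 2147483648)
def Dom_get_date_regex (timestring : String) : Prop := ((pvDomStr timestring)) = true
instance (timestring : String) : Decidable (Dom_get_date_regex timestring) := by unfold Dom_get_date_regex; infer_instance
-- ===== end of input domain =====

-- B replaces A's prev-character flag with a lookahead scanner that consumes percent escapes as whole two-character tokens (more idiomatic; same cost).


-- ===== PORT A =====
-- DATE_REGEX lookup: some value iff the char is a key of DATE_REGEX
def dateRegex? (c : Char) : Option String :=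
  if c = 'Y' then some "4"
  else if c = 'm' then some "2"
  else if c = 'W' then some "2"
  else if c = 'U' then some "2"
  else if c = 'd' then some "2"
  else if c = 'H' then some "2"
  else none

-- one iteration of A's for-loop; state = (prev, regex); prev = none for Python's initial ''
def aStep (st : Option Char × String) (curr : Char) : Option Char × String :=
  if curr = '%' then (some curr, st.2)
  else if (dateRegex? curr).isSome && (st.1 == some '%') then
    (some curr, st.2 ++ "\\d{" ++ (dateRegex? curr).getD "" ++ "}")
  else
    (some curr, st.2 ++ "\\" ++ String.ofList [curr])

def get_date_regex (timestring : String) : String :=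
  (timestring.toList.foldl aStep (none, "")).2

-- ===== PORT B =====
-- lookahead scanner over the character list (Source B's while-loop with index i)
def altGo : List Char → String → String
  | [], acc => acc
  | ['%'], acc => acc
  | '%' :: c2 :: rest', acc =>
    match dateRegex? c2 with
    | some n => altGo rest' (acc ++ "\\d{" ++ n ++ "}")
    | none => altGo (c2 :: rest') acc
  | c :: rest, acc => altGo rest (acc ++ "\\" ++ String.ofList [c])
def get_date_regex_alt (timestring : String) : String :=
  altGo timestring.toList ""

-- ===== PRECONDITION & SPEC =====
def Spec_get_date_regex (timestring : String) (out : String) : Prop := out = get_date_regex_alt timestring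
instance (timestring : String) (out : String) : Decidable (Spec_get_date_regex timestring out) := by unfold Spec_get_date_regex; infer_instance

-- ===== CLAIM (what is proved, stated in full; the proofs are below) =====
def Claim_equal_get_date_regex : Prop := ∀ (timestring : String), Dom_get_date_regex timestring → Spec_get_date_regex timestring (get_date_regex timestring)

-- ===== LEMMAS AND PROOFS =====

theorem altGo_nil (acc : String) : altGo [] acc = acc := by rw [altGo]

theorem altGo_pct_nil (acc : String) : altGo ['%'] acc = acc := by rw [altGo]

theorem altGo_pct_some (c : Char) (t : List Char) (acc n : String) (hd : dateRegex? c = some n) :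
    altGo ('%' :: c :: t) acc = altGo t (acc ++ "\\d{" ++ n ++ "}") := by
  rw [altGo.eq_def]; simp [hd]

theorem altGo_pct_none (c : Char) (t : List Char) (acc : String) (hd : dateRegex? c = none) :
    altGo ('%' :: c :: t) acc = altGo (c :: t) acc := by
  rw [altGo.eq_def]; simp [hd]

theorem altGo_other (c : Char) (t : List Char) (acc : String) (hc : c ≠ '%') :
    altGo (c :: t) acc = altGo t (acc ++ "\\" ++ String.ofList [c]) := by
  rw [altGo.eq_def]
  cases t with
  | nil => simp [hc, altGo]
  | cons d u => simp [hc]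

-- Loop invariant: A's fold from state (prev, acc) computes what B's scanner computes,
-- with a pending '%' token when prev = '%'.
theorem foldl_aStep_eq_altGo (l : List Char) : ∀ (prev : Option Char) (acc : String),
    (l.foldl aStep (prev, acc)).2 =
      if prev = some '%' then altGo ('%' :: l) acc else altGo l acc := by
  induction l with
  | nil =>
    intro prev acc
    by_cases h : prev = some '%' <;> simp [h, altGo_nil, altGo_pct_nil]
  | cons c t ih =>
    intro prev acc
    by_cases hc : c = '%'
    · subst hc
      have hp : dateRegex? '%' = none := by decide
      by_cases h : prev = some '%' <;>
        simp [h, aStep, List.foldl_cons, ih, altGo_pct_none _ _ _ hp]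
    · by_cases h : prev = some '%'
      · subst h
        cases hd : dateRegex? c with
        | some n =>
          simp [aStep, hc, hd, List.foldl_cons, ih, altGo_pct_some _ _ _ _ hd]
        | none =>
          simp [aStep, hc, hd, List.foldl_cons, ih, altGo_pct_none _ _ _ hd,
            altGo_other _ _ _ hc]
      · cases hd : dateRegex? c with
        | some n => simp [aStep, hc, hd, h, List.foldl_cons, ih, altGo_other _ _ _ hc]
        | none => simp [aStep, hc, hd, h, List.foldl_cons, ih, altGo_other _ _ _ hc]

-- ===== VERDICT (by name: the statement is the Claim_ definition above) =====
theorem get_date_regex_spec : Claim_equal_get_date_regex := by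
  intro s _
  unfold Spec_get_date_regex get_date_regex get_date_regex_alt
  simp [foldl_aStep_eq_altGo]
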